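-- pv_equiv track=rewrite | github.com/NicholasBertollo-14/my_ENGG1810_tutoring_resources | week_10_competition_questions/solutions.py | similar_factors
-- ===== SOURCE A (Python) =====
-- def is_prime(n: int) -> bool:
--     """
--     Checks whether n is prime
--     """
--     for i in range(2, n):
--         if n % i == 0:
--             return False
--     return True
--
-- def primes(n: int):
--     """
--     Creates a generator which returns the next prime number upto
--     n.
--     e.g.
--     If n = 22 then
--         2, 3, 5, 7, 11, 13, 17, 19
--     will be yielded
--     """
--     for i in range(2, n):
--         if is_prime(i):
--             yield i
--
-- def factorator(n: int) -> dict[int: int]: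
--     """
--     returns a dictionary, where the key is the prime factor, and the value is the power
--     """
--     factors: dict[int: int] = {}
--     for prime in primes(n):
--         while n % prime == 0:
--             if prime in factors.keys():
--                 factors[prime] += 1
--             else:
--                 factors[prime] = 1
--             n //= prime
--     return factors
--
-- def similar_factors(n_1: int, n_2: int) -> int:
--     """
--     returns a number n_3, where only similar factors are inluded:
--     e.g.
--     n_1 = 36 = 3 ** 2 * 2 ** 2
--     n_2 = 20 = 5 * 2 ** 2
--     Therefore, n_3 = 2 ** 2 = 4, as 2 is similar twice
--     returns 1 if no common factors
--     """
--     factors_1: dict[int: int] = factorator(n_1)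
--     factors_2: dict[int: int] = factorator(n_2)
--     common_factors: set[int] = set(factors_1.keys()).intersection(factors_2.keys())
--     n_3: int = 1
--     for factor in common_factors:
--         n_3 *= factor * min(factors_1[factor], factors_2[factor])
--     return n_3
-- ===== SOURCE B (Python) =====
-- def _factorize(n: int) -> dict:
--     """Prime-exponent map of n by trial division up to sqrt(n)."""
--     factors = {}
--     d = 2
--     while d * d <= n:
--         while n % d == 0:
--             factors[d] = factors.get(d, 0) + 1
--             n //= d
--         d += 1
--     if n > 1:
--         factors[n] = 1
--     return factors
--
-- def similar_factors(n_1: int, n_2: int) -> int: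
--     factors_1 = _factorize(n_1)
--     factors_2 = _factorize(n_2)
--     n_3 = 1
--     for factor, power in factors_1.items():
--         if factor in factors_2:
--             n_3 *= factor * min(power, factors_2[factor])
--     return n_3
-- ===== Notes on version B (the rewrite author's own statement) =====
-- stated objective: faster
-- what changed: A builds full prime lists up to each n via an O(n) primality test per candidate (O(n^2) per argument); B factorizes by standard trial division up to sqrt(n) and multiplies over shared primes in one pass over the first factor map.
-- intended difference: When one argument is itself prime and divides the other (both >= 2), A omits that shared prime and returns the product without it (factorator(p) = {} for prime p because primes(n) stops strictly below n), e.g. A(3,9)=1; B includes it, e.g. B(3,9)=3, which is the intended shared-prime-factors value. — e.g. on similar_factors(2, 2): A returns 1, B returns 2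
import Mathlib
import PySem

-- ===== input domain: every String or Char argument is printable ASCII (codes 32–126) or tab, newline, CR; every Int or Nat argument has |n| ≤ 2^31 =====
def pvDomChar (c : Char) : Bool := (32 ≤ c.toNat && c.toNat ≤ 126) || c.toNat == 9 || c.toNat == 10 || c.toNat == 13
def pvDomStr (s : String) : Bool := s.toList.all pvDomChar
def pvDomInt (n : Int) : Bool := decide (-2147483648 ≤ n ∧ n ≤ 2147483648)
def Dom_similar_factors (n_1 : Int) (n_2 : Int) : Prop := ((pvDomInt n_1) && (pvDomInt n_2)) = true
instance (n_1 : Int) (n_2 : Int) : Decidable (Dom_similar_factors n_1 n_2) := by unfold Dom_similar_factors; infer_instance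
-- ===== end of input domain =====

-- B replaces A's O(n^2) prime enumeration (trial division by every i < candidate, for every
-- candidate < n) by standard trial division up to sqrt(n); on inputs where one argument is itself
-- prime and divides the other, B's value intentionally differs from A's (see D_ below).

-- ===== PORT A =====
-- is_prime: `for i in range(2, n): if n % i == 0: return False` / `return True`
def is_prime_loop (n : Int) : List Int → Bool
  | [] => true
  | i :: rest => if PySem.Int.mod n i = 0 then false else is_prime_loop n rest

def is_prime (n : Int) : Bool := is_prime_loop n (PySem.List.pyRange 2 n 1)

-- primes(n): the generator is consumed as the list of primes in range(2, n)
def primes (n : Int) : List Int := (PySem.List.pyRange 2 n 1).filter is_prime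

-- `if prime in factors.keys(): factors[prime] += 1 else: factors[prime] = 1`
def facBump (factors : PySem.Dict Int Int) (prime : Int) : PySem.Dict Int Int :=
  if factors.contains prime then factors.insert prime (factors.getD prime 0 + 1)
  else factors.insert prime 1

-- `while n % prime == 0: ... n //= prime`; fuel n.toNat bounds the divisions (n is positive
-- whenever the loop is reached and at least halves each pass), so the port is exact.
def facWhile (fuel : Nat) (prime : Int) (factors : PySem.Dict Int Int) (n : Int) :
    PySem.Dict Int Int × Int :=
  match fuel with
  | 0 => (factors, n)
  | fuel + 1 =>
    if PySem.Int.mod n prime = 0 then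
      facWhile fuel prime (facBump factors prime) (PySem.Int.floordiv n prime)
    else (factors, n)

def factorator (n : Int) : PySem.Dict Int Int :=
  ((primes n).foldl (fun st prime => facWhile st.2.toNat prime st.1 st.2)
    (PySem.Dict.empty, n)).1

-- Python iterates `common_factors` (a set) in hash order; the running product is
-- order-independent, so the port uses the set's first-insertion order.
-- `factors_i[factor]` is an exact lookup (factor is a common key), ported as getD _ 0.
def similar_factors (n_1 : Int) (n_2 : Int) : Int :=
  let factors_1 := factorator n_1
  let factors_2 := factorator n_2
  let common_factors : PySem.Set Int :=
    PySem.Set.inter (PySem.Set.ofList factors_1.keys) factors_2.keys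
  common_factors.foldl
    (fun n_3 factor => n_3 * (factor * min (factors_1.getD factor 0) (factors_2.getD factor 0))) 1

-- ===== PORT B =====
-- `factors[d] = factors.get(d, 0) + 1`
def altBump (f : PySem.Dict Int Int) (d : Int) : PySem.Dict Int Int :=
  f.insert d (f.getD d 0 + 1)

-- inner `while n % d == 0:`; fuel n.toNat bounds the divisions as in facWhile
def altWhile (fuel : Nat) (d : Int) (f : PySem.Dict Int Int) (n : Int) :
    PySem.Dict Int Int × Int :=
  match fuel with
  | 0 => (f, n)
  | fuel + 1 =>
    if PySem.Int.mod n d = 0 then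
      altWhile fuel d (altBump f d) (PySem.Int.floordiv n d)
    else (f, n)

-- outer `while d * d <= n:`; the fuel passed below bounds its iterations (d never exceeds n)
def altOuter (fuel : Nat) (d : Int) (f : PySem.Dict Int Int) (n : Int) :
    PySem.Dict Int Int × Int :=
  match fuel with
  | 0 => (f, n)
  | fuel + 1 =>
    if d * d ≤ n then
      let st := altWhile n.toNat d f n
      altOuter fuel (d + 1) st.1 st.2
    else (f, n)

-- `if n > 1: factors[n] = 1`
def factorize (n : Int) : PySem.Dict Int Int :=
  let st := altOuter (2 * n.toNat + 1) 2 PySem.Dict.empty n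
  if 1 < st.2 then st.1.insert st.2 1 else st.1

def similar_factors_alt (n_1 : Int) (n_2 : Int) : Int :=
  let factors_1 := factorize n_1
  let factors_2 := factorize n_2
  factors_1.items.foldl
    (fun n_3 p =>
      if factors_2.contains p.1 then n_3 * (p.1 * min p.2 (factors_2.getD p.1 0)) else n_3) 1

-- ===== PRECONDITION & SPEC =====
-- When one argument is itself prime and divides the other (both ≥ 2), A returns the product
-- omitting that shared prime (A's primes(n) stops strictly below n, so factorator(p) = {} for
-- prime p), e.g. A(3,9)=1; B includes it, e.g. B(3,9)=3, the intended shared-prime-factors value.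
def D_similar_factors (n_1 : Int) (n_2 : Int) : Prop :=
  (Nat.Prime n_1.toNat ∧ n_1 ∣ n_2 ∧ 2 ≤ n_2) ∨ (Nat.Prime n_2.toNat ∧ n_2 ∣ n_1 ∧ 2 ≤ n_1)
instance (n_1 : Int) (n_2 : Int) : Decidable (D_similar_factors n_1 n_2) := by
  unfold D_similar_factors; infer_instance

def Spec_similar_factors (n_1 : Int) (n_2 : Int) (out : Int) : Prop :=
  ¬ D_similar_factors n_1 n_2 → out = similar_factors_alt n_1 n_2
instance (n_1 : Int) (n_2 : Int) (out : Int) : Decidable (Spec_similar_factors n_1 n_2 out) := by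
  unfold Spec_similar_factors; infer_instance

def pvDiffWitness_similar_factors : Int × Int := (2, 2)
def pvDiffWitnessOut_similar_factors : Int × Int := (1, 2)

-- ===== CLAIM (what is proved, stated in full; the proofs are below) =====
def Claim_unchanged_similar_factors : Prop := ∀ (n_1 : Int) (n_2 : Int), Dom_similar_factors n_1 n_2 → Spec_similar_factors n_1 n_2 (similar_factors n_1 n_2)
def Claim_changed_similar_factors : Prop := Dom_similar_factors (pvDiffWitness_similar_factors.1) (pvDiffWitness_similar_factors.2) ∧ D_similar_factors (pvDiffWitness_similar_factors.1) (pvDiffWitness_similar_factors.2) ∧ similar_factors (pvDiffWitness_similar_factors.1) (pvDiffWitness_similar_factors.2) = pvDiffWitnessOut_similar_factors.1 ∧ similar_factors_alt (pvDiffWitness_similar_factors.1) (pvDiffWitness_similar_factors.2) = pvDiffWitnessOut_similar_factors.2 ∧ pvDiffWitnessOut_similar_factors.1 ≠ pvDiffWitnessOut_similar_factors.2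

-- ===== LEMMAS AND PROOFS =====
-- the shared reference loop: fold A's per-prime division loop over a list of candidate divisors
def refFold (l : List Int) (st : PySem.Dict Int Int × Int) : PySem.Dict Int Int × Int :=
  l.foldl (fun st p => facWhile st.2.toNat p st.1 st.2) st

-- m has no divisor in [2, d)
def NoSmall (d m : Int) : Prop := ∀ q : Int, 2 ≤ q → q < d → ¬ q ∣ m

lemma facBump_eq_altBump (f : PySem.Dict Int Int) (p : Int) : facBump f p = altBump f p := by
  unfold facBump altBump
  by_cases h : f.contains p = true
  · simp [h]
  · have hc : f.contains p = false := by simpa using h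
    simp [h, PySem.Dict.getD_of_not_contains f 0 hc]

lemma mem_keys_facBump (f : PySem.Dict Int Int) (p k : Int) :
    k ∈ (facBump f p).keys ↔ k = p ∨ k ∈ f.keys := by
  unfold facBump; split <;> simp [PySem.Dict.mem_keys_insert]

lemma nodup_keys_facBump (f : PySem.Dict Int Int) (p : Int) (h : f.keys.Nodup) :
    (facBump f p).keys.Nodup := by
  unfold facBump; split <;> exact PySem.Dict.nodup_keys_insert _ _ _ h

lemma div_step (p n : Int) (hp : 2 ≤ p) (hn : 1 ≤ n) (hd : p ∣ n) :
    1 ≤ PySem.Int.floordiv n p ∧ PySem.Int.floordiv n p < n ∧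
      PySem.Int.floordiv n p ∣ n := by
  rw [PySem.Int.floordiv_eq_ediv_of_pos (by omega)]
  refine ⟨?_, ?_, ?_⟩
  · rw [Int.le_ediv_iff_mul_le (by omega)]
    have := Int.le_of_dvd (by omega) hd; omega
  · rw [Int.ediv_lt_iff_lt_mul (by omega)]; nlinarith
  · exact ⟨p, (Int.ediv_mul_cancel hd).symm⟩

lemma facWhile_eq_altWhile (fuel : Nat) (p : Int) (f : PySem.Dict Int Int) (n : Int) :
    facWhile fuel p f n = altWhile fuel p f n := by
  induction fuel generalizing f n with
  | zero => rfl
  | succ k ih => simp only [facWhile, altWhile, facBump_eq_altBump]; split <;> simp [ih]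

lemma facWhile_not_dvd (fuel : Nat) (p : Int) (f : PySem.Dict Int Int) (n : Int)
    (h : ¬ p ∣ n) : facWhile fuel p f n = (f, n) := by
  cases fuel with
  | zero => rfl
  | succ k =>
    have : ¬ PySem.Int.mod n p = 0 := by
      simpa [PySem.Int.mod_eq_zero_iff_dvd] using h
    simp [facWhile, this]

-- keys produced by one division loop: old keys, or the divisor p itself (and then p divided n)
lemma facWhile_keys (fuel : Nat) (p : Int) (f : PySem.Dict Int Int) (n : Int) :
    ∀ k ∈ (facWhile fuel p f n).1.keys, k ∈ f.keys ∨ (k = p ∧ p ∣ n) := by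
  induction fuel generalizing f n with
  | zero => intro k hk; exact Or.inl hk
  | succ m ih =>
    intro k hk
    simp only [facWhile] at hk
    split at hk
    · rename_i h
      have hd : p ∣ n := (PySem.Int.mod_eq_zero_iff_dvd n p).mp h
      rcases ih (facBump f p) _ k hk with h' | h'
      · rcases (mem_keys_facBump f p k).mp h' with h'' | h''
        · exact Or.inr ⟨h'', hd⟩
        · exact Or.inl h''
      · exact Or.inr ⟨h'.1, hd⟩
    · exact Or.inl hk

lemma facWhile_snd_dvd (fuel : Nat) (p : Int) (f : PySem.Dict Int Int) (n : Int) (hp : 2 ≤ p) :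
    (facWhile fuel p f n).2 ∣ n := by
  induction fuel generalizing f n with
  | zero => exact dvd_refl n
  | succ m ih =>
    simp only [facWhile]
    split
    · rename_i h
      have hd : p ∣ n := (PySem.Int.mod_eq_zero_iff_dvd n p).mp h
      have hfd : PySem.Int.floordiv n p ∣ n := by
        rw [PySem.Int.floordiv_eq_ediv_of_pos (by omega)]
        exact ⟨p, (Int.ediv_mul_cancel hd).symm⟩
      exact (ih _ _).trans hfd
    · exact dvd_refl n

-- post-state facts for one full division loop
lemma facWhile_spec (fuel : Nat) (p : Int) (f : PySem.Dict Int Int) (n : Int)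
    (hp : 2 ≤ p) (hn : 1 ≤ n) (hf : n.toNat ≤ fuel) :
    1 ≤ (facWhile fuel p f n).2 ∧ (facWhile fuel p f n).2 ∣ n ∧
      ¬ p ∣ (facWhile fuel p f n).2 := by
  induction fuel generalizing f n with
  | zero => omega
  | succ k ih =>
    simp only [facWhile]
    split
    · rename_i h
      have hd : p ∣ n := (PySem.Int.mod_eq_zero_iff_dvd n p).mp h
      obtain ⟨h1, h2, h3⟩ := div_step p n hp hn hd
      obtain ⟨i1, i2, i3⟩ := ih (facBump f p) _ h1 (by omega)
      exact ⟨i1, i2.trans h3, i3⟩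
    · rename_i h
      have hd : ¬ p ∣ n := fun hd => h ((PySem.Int.mod_eq_zero_iff_dvd n p).mpr hd)
      exact ⟨hn, dvd_refl n, hd⟩

lemma facWhile_nodup (fuel : Nat) (p : Int) (f : PySem.Dict Int Int) (n : Int)
    (h : f.keys.Nodup) : (facWhile fuel p f n).1.keys.Nodup := by
  induction fuel generalizing f n with
  | zero => exact h
  | succ k ih =>
    simp only [facWhile]
    split
    · exact ih _ _ (nodup_keys_facBump f p h)
    · exact h

-- a stretch of candidates none of which divides m is a no-op
lemma refFold_nop (l : List Int) (f : PySem.Dict Int Int) (m : Int)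
    (h : ∀ e ∈ l, ¬ e ∣ m) : refFold l (f, m) = (f, m) := by
  induction l with
  | nil => rfl
  | cons e rest ih =>
    have : refFold (e :: rest) (f, m) = refFold rest (facWhile m.toNat e f m) := rfl
    rw [this, facWhile_not_dvd _ _ _ _ (h e (by simp))]
    exact ih fun e' he' => h e' (by simp [he'])

lemma is_prime_loop_false (n : Int) (l : List Int) (h : is_prime_loop n l = false) :
    ∃ i ∈ l, PySem.Int.mod n i = 0 := by
  induction l with
  | nil => simp [is_prime_loop] at h
  | cons i rest ih =>
    simp only [is_prime_loop] at h
    split at h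
    · exact ⟨i, by simp, by assumption⟩
    · obtain ⟨j, hj, hj'⟩ := ih h
      exact ⟨j, by simp [hj], hj'⟩

lemma is_prime_false (d : Int) (h : is_prime d = false) :
    ∃ q : Int, 2 ≤ q ∧ q < d ∧ q ∣ d := by
  obtain ⟨q, hq, hq'⟩ := is_prime_loop_false d _ h
  rw [PySem.List.mem_pyRange_one] at hq
  exact ⟨q, hq.1, hq.2, (PySem.Int.mod_eq_zero_iff_dvd d q).mp hq'⟩

-- A's fold over the primes only = the fold over all of range(2, n)
lemma filter_eq_full (k : Nat) : ∀ (d : Int) (f : PySem.Dict Int Int) (m : Int),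
    2 ≤ d → 1 ≤ m → NoSmall d m →
    refFold ((PySem.List.pyRange d (d + k) 1).filter is_prime) (f, m)
      = refFold (PySem.List.pyRange d (d + k) 1) (f, m) := by
  induction k with
  | zero => intro d f m _ _ _; norm_num
  | succ k ih =>
    intro d f m hd hm hns
    have hlt : d < d + ((k : Int) + 1) := by omega
    rw [show ((k + 1 : Nat) : Int) = (k : Int) + 1 by push_cast; ring] at *
    rw [PySem.List.pyRange_one_cons hlt, show d + ((k : Int) + 1) = (d + 1) + (k : Int) by ring]
    rw [List.filter_cons]
    by_cases hp : is_prime d = true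
    · rw [hp]
      simp only [if_true]
      have hstep : ∀ L st, refFold (d :: L) st = refFold L (facWhile st.2.toNat d st.1 st.2) :=
        fun L st => rfl
      rw [hstep, hstep]
      obtain ⟨s1, s2, s3⟩ := facWhile_spec m.toNat d f m hd hm le_rfl
      set st := facWhile m.toNat d f m with hst
      have : st = (st.1, st.2) := rfl
      rw [this]
      exact ih (d + 1) st.1 st.2 (by omega) s1 (fun q hq2 hqd hqdvd => by
        rcases lt_or_eq_of_le (show q ≤ d by omega) with h | h
        · exact hns q hq2 h (hqdvd.trans s2)
        · rw [h] at hqdvd; exact s3 hqdvd)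
    · have hp' : is_prime d = false := by simpa using hp
      rw [hp']
      simp only [Bool.false_eq_true, if_false]
      obtain ⟨q, hq2, hqd, hqdvd⟩ := is_prime_false d hp'
      have hdm : ¬ d ∣ m := fun hdm => hns q hq2 hqd (hqdvd.trans hdm)
      have hstep : ∀ L st, refFold (d :: L) st = refFold L (facWhile st.2.toNat d st.1 st.2) :=
        fun L st => rfl
      rw [hstep, facWhile_not_dvd _ _ _ _ hdm]
      exact ih (d + 1) f m (by omega) hm (fun q' hq2' hqd' hqdvd' => by
        rcases lt_or_eq_of_le (show q' ≤ d by omega) with h | h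
        · exact hns q' hq2' h hqdvd'
        · rw [h] at hqdvd'; exact hdm hqdvd')

lemma facWhile_self (m : Int) (f : PySem.Dict Int Int) (hm : 2 ≤ m) :
    facWhile m.toNat m f m = (facBump f m, 1) := by
  have h2 : m.toNat = (m.toNat - 1) + 1 := by omega
  rw [h2]
  simp only [facWhile]
  rw [if_pos ((PySem.Int.mod_eq_zero_iff_dvd m m).mpr dvd_rfl)]
  have hfd : PySem.Int.floordiv m m = 1 := by
    rw [PySem.Int.floordiv_eq_ediv_of_pos (by omega)]
    exact Int.ediv_self (by omega)
  rw [hfd, facWhile_not_dvd _ _ _ _ (fun h => by have := Int.le_of_dvd one_pos h; omega)]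

-- past the point d*d > m, the remaining candidates produce exactly the leftover insertion
lemma ref_tail (d m n0 : Int) (f : PySem.Dict Int Int)
    (hd : 2 ≤ d) (hm : 1 ≤ m) (hmn : m ≤ n0) (hns : NoSmall d m)
    (hkeys : ∀ k ∈ f.keys, k < d) (hdd : m < d * d) :
    (if 1 < m ∧ m ≠ n0 then f.insert m 1 else f)
      = (refFold (PySem.List.pyRange d n0 1) (f, m)).1 := by
  by_cases h1 : m = 1
  · subst h1
    rw [refFold_nop _ f 1 (fun e he hdvd => by
      rw [PySem.List.mem_pyRange_one] at he
      have := Int.le_of_dvd one_pos hdvd; omega)]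
    norm_num
  · have hm2 : 2 ≤ m := by omega
    have hprime : NoSmall m m := by
      intro q hq2 hqm hqd
      by_cases hqd' : q < d
      · exact hns q hq2 hqd' hqd
      · push_neg at hqd'
        obtain ⟨c, hc⟩ := hqd
        have hcpos : 0 < c := by by_contra h; push_neg at h; nlinarith
        have hc1 : c ≠ 1 := by intro h; rw [h, mul_one] at hc; omega
        have hcd : c < d := by by_contra h; push_neg at h; nlinarith
        exact hns c (by omega) hcd ⟨q, by rw [hc]; ring⟩
    have hdm : d ≤ m := by
      by_contra h
      exact hns m hm2 (by omega) dvd_rfl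
    by_cases hmn0 : m = n0
    · rw [refFold_nop _ f m (fun e he hdvd => by
        rw [PySem.List.mem_pyRange_one] at he
        exact hprime e (by omega) (by omega) hdvd)]
      rw [if_neg (fun h => h.2 hmn0)]
    · have hmn' : m < n0 := by omega
      rw [PySem.List.pyRange_one_append d m n0 hdm (by omega),
          PySem.List.pyRange_one_cons hmn']
      have hsplit : ∀ (l1 l2 : List Int) st, refFold (l1 ++ l2) st = refFold l2 (refFold l1 st) := by
        intro l1 l2 st; simp [refFold, List.foldl_append]
      rw [hsplit]
      rw [refFold_nop _ f m (fun e he hdvd => by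
        rw [PySem.List.mem_pyRange_one] at he
        exact hprime e (by omega) (by omega) hdvd)]
      have hstep : ∀ (L : List Int) st, refFold (m :: L) st = refFold L (facWhile st.2.toNat m st.1 st.2) :=
        fun _ _ => rfl
      rw [hstep]
      simp only []
      rw [facWhile_self m f hm2]
      rw [refFold_nop _ _ 1 (fun e he hdvd => by
        rw [PySem.List.mem_pyRange_one] at he
        have := Int.le_of_dvd one_pos hdvd; omega)]
      rw [if_pos ⟨by omega, hmn0⟩]
      have hcont : ¬ f.contains m = true := fun h => by
        have := hkeys m ((PySem.Dict.contains_iff_mem_keys f m).mp h); omega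
      simp [facBump, hcont]

lemma alt_eq_ref (fuel : Nat) : ∀ (d : Int) (f : PySem.Dict Int Int) (m n0 : Int),
    2 ≤ d → 1 ≤ m → m ≤ n0 → NoSmall d m → (∀ k ∈ f.keys, k < d) →
    m.toNat + (m + 1 - d).toNat ≤ fuel →
    (if 1 < (altOuter fuel d f m).2 ∧ (altOuter fuel d f m).2 ≠ n0 then
        (altOuter fuel d f m).1.insert (altOuter fuel d f m).2 1
      else (altOuter fuel d f m).1)
      = (refFold (PySem.List.pyRange d n0 1) (f, m)).1 := by
  induction fuel with
  | zero => intro d f m n0 hd hm hmn hns hkeys hfuel; omega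
  | succ k ih =>
    intro d f m n0 hd hm hmn hns hkeys hfuel
    by_cases hdd : d * d ≤ m
    · have hstep : altOuter (k+1) d f m
          = altOuter k (d+1) (altWhile m.toNat d f m).1 (altWhile m.toNat d f m).2 := by
        simp [altOuter, hdd]
      rw [hstep, ← facWhile_eq_altWhile]
      obtain ⟨s1, s2, s3⟩ := facWhile_spec m.toNat d f m hd hm le_rfl
      have s4 := facWhile_keys m.toNat d f m
      have hdm : d ≤ m := by nlinarith
      have hm'le : (facWhile m.toNat d f m).2 ≤ m := Int.le_of_dvd (by omega) s2
      have hdn0 : d < n0 := by nlinarith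
      rw [PySem.List.pyRange_one_cons hdn0]
      have hstep2 : ∀ (L : List Int) (s : PySem.Dict Int Int × Int),
          refFold (d :: L) s = refFold L (facWhile s.2.toNat d s.1 s.2) := fun _ _ => rfl
      rw [hstep2]
      have hres := ih (d+1) (facWhile m.toNat d f m).1 (facWhile m.toNat d f m).2 n0
        (by omega) s1 (by omega)
        (fun q hq2 hqd hqdvd => by
          rcases lt_or_eq_of_le (show q ≤ d by omega) with h | h
          · exact hns q hq2 h (hqdvd.trans s2)
          · rw [h] at hqdvd; exact s3 hqdvd)
        (fun kk hkk => by
          rcases s4 kk hkk with h | h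
          · have := hkeys kk h; omega
          · omega)
        (by omega)
      exact hres
    · have hstop : altOuter (k+1) d f m = (f, m) := by simp [altOuter, hdd]
      rw [hstop]
      exact ref_tail d m n0 f hd hm hmn hns hkeys (by omega)

lemma refFold_nodup (l : List Int) (st : PySem.Dict Int Int × Int) (h : st.1.keys.Nodup) :
    (refFold l st).1.keys.Nodup := by
  induction l generalizing st with
  | nil => exact h
  | cons e rest ih => exact ih _ (facWhile_nodup _ _ _ _ h)

-- keys produced by the reference fold all divide the running value
lemma refFold_keys (l : List Int) : ∀ (f : PySem.Dict Int Int) (m : Int),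
    (∀ e ∈ l, 2 ≤ e) → ∀ k ∈ (refFold l (f, m)).1.keys, k ∈ f.keys ∨ k ∣ m := by
  induction l with
  | nil => intro f m _ k hk; exact Or.inl hk
  | cons e rest ih =>
    intro f m hl k hk
    have hstep : refFold (e :: rest) (f, m) = refFold rest (facWhile m.toNat e f m) := rfl
    rw [hstep] at hk
    have he2 : 2 ≤ e := hl e (by simp)
    set st := facWhile m.toNat e f m with hst
    have hpair : refFold rest st = refFold rest (st.1, st.2) := rfl
    rw [hpair] at hk
    rcases ih st.1 st.2 (fun e' he' => hl e' (by simp [he'])) k hk with h | h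
    · rcases facWhile_keys m.toNat e f m k h with h' | h'
      · exact Or.inl h'
      · exact Or.inr (h'.1 ▸ h'.2)
    · exact Or.inr (h.trans (facWhile_snd_dvd m.toNat e f m he2))

lemma factorator_keys_nodup (n : Int) : (factorator n).keys.Nodup := by
  show (refFold (primes n) (PySem.Dict.empty, n)).1.keys.Nodup
  exact refFold_nodup _ _ (by simp)

lemma factorator_keys_dvd (n : Int) : ∀ k ∈ (factorator n).keys, k ∣ n := by
  intro k hk
  have hk' : k ∈ (refFold (primes n) (PySem.Dict.empty, n)).1.keys := hk
  rcases refFold_keys (primes n) PySem.Dict.empty n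
      (fun e he => by
        have : e ∈ PySem.List.pyRange 2 n 1 := List.mem_of_mem_filter he
        rw [PySem.List.mem_pyRange_one] at this; omega) k hk' with h | h
  · simp at h
  · exact h

-- integer primality (2 ≤ n and no proper divisor) matches Nat.Prime on toNat
lemma prime_bridge (n : Int) : (2 ≤ n ∧ NoSmall n n) ↔ Nat.Prime n.toNat := by
  constructor
  · rintro ⟨h2, hns⟩
    rw [Nat.prime_def_lt]
    refine ⟨by omega, fun m hm hdvd => ?_⟩
    by_contra hm1
    have hm0 : m ≠ 0 := by
      rintro rfl
      rw [Nat.zero_dvd] at hdvd; omega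
    have hm2 : 2 ≤ m := by omega
    have hdvd' : (m : Int) ∣ n := by
      have h := Int.natCast_dvd_natCast.mpr hdvd
      rwa [Int.toNat_of_nonneg (by omega)] at h
    exact hns m (by exact_mod_cast hm2) (by omega) hdvd'
  · intro hp
    have h2 : 2 ≤ n.toNat := hp.two_le
    refine ⟨by omega, fun q hq2 hqn hqd => ?_⟩
    have hq0 : 0 ≤ q := by omega
    have hdvd : q.toNat ∣ n.toNat := by
      have : ((q.toNat : Int)) ∣ ((n.toNat : Int)) := by
        rwa [Int.toNat_of_nonneg hq0, Int.toNat_of_nonneg (by omega)]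
      exact_mod_cast this
    have := (Nat.prime_def_lt.mp hp).2 q.toNat (by omega) hdvd
    omega

-- prime inputs: A's factorator is empty (primes(n) stops below n), B keeps the single prime
lemma factorator_prime (n : Int) (h2 : 2 ≤ n) (hns : NoSmall n n) :
    factorator n = PySem.Dict.empty := by
  show (refFold (primes n) (PySem.Dict.empty, n)).1 = PySem.Dict.empty
  rw [refFold_nop _ _ _ (fun e he hdvd => by
    have he' : e ∈ PySem.List.pyRange 2 n 1 := List.mem_of_mem_filter he
    rw [PySem.List.mem_pyRange_one] at he'
    exact hns e he'.1 he'.2 hdvd)]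

lemma altOuter_prime (fuel : Nat) : ∀ (d : Int) (f : PySem.Dict Int Int) (n : Int),
    2 ≤ d → 2 ≤ n → NoSmall n n → altOuter fuel d f n = (f, n) := by
  induction fuel with
  | zero => intro d f n _ _ _; rfl
  | succ k ih =>
    intro d f n hd hn hns
    simp only [altOuter]
    by_cases hdd : d * d ≤ n
    · rw [if_pos hdd]
      have hdn : d < n := by nlinarith
      have hnd : ¬ d ∣ n := hns d hd hdn
      rw [← facWhile_eq_altWhile, facWhile_not_dvd _ _ _ _ hnd]
      exact ih (d + 1) f n (by omega) hn hns
    · rw [if_neg hdd]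

lemma factorize_prime (n : Int) (h2 : 2 ≤ n) (hns : NoSmall n n) :
    factorize n = PySem.Dict.empty.insert n 1 := by
  unfold factorize
  rw [altOuter_prime _ 2 PySem.Dict.empty n (by omega) h2 hns]
  simp only []
  rw [if_pos (by omega : (1:Int) < n)]

-- result value of the outer loop never grows
lemma altOuter_snd_le (fuel : Nat) : ∀ (d : Int) (f : PySem.Dict Int Int) (m : Int),
    2 ≤ d → 1 ≤ m → (altOuter fuel d f m).2 ≤ m ∧ 1 ≤ (altOuter fuel d f m).2 := by
  induction fuel with
  | zero => intro d f m _ hm; exact ⟨le_rfl, hm⟩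
  | succ k ih =>
    intro d f m hd hm
    simp only [altOuter]
    by_cases hdd : d * d ≤ m
    · rw [if_pos hdd]
      rw [← facWhile_eq_altWhile]
      obtain ⟨s1, s2, _⟩ := facWhile_spec m.toNat d f m hd hm le_rfl
      have hle : (facWhile m.toNat d f m).2 ≤ m := Int.le_of_dvd (by omega) s2
      obtain ⟨h1, h2⟩ := ih (d+1) (facWhile m.toNat d f m).1 (facWhile m.toNat d f m).2 (by omega) s1
      exact ⟨h1.trans hle, h2⟩
    · rw [if_neg hdd]; exact ⟨le_rfl, hm⟩

-- with a reachable divisor ahead, the outer loop strictly reduces the value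
lemma altOuter_composite (fuel : Nat) : ∀ (d : Int) (f : PySem.Dict Int Int) (m q : Int),
    2 ≤ d → 1 ≤ m → d ≤ q → q * q ≤ m → q ∣ m → (q - d).toNat + 1 ≤ fuel →
    (altOuter fuel d f m).2 < m := by
  induction fuel with
  | zero => intro d f m q _ _ _ _ _ hfuel; omega
  | succ k ih =>
    intro d f m q hd hm hdq hqq hqm hfuel
    have hdd : d * d ≤ m := by nlinarith
    simp only [altOuter]
    rw [if_pos hdd]
    rw [← facWhile_eq_altWhile]
    by_cases hdvd : d ∣ m
    · obtain ⟨s1, s2, s3⟩ := facWhile_spec m.toNat d f m hd hm le_rfl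
      have hne : (facWhile m.toNat d f m).2 ≠ m := fun h => s3 (by rw [h]; exact hdvd)
      have hlt : (facWhile m.toNat d f m).2 < m :=
        lt_of_le_of_ne (Int.le_of_dvd (by omega) s2) hne
      have := (altOuter_snd_le k (d+1) (facWhile m.toNat d f m).1
        (facWhile m.toNat d f m).2 (by omega) s1).1
      omega
    · rw [facWhile_not_dvd _ _ _ _ hdvd]
      have hdq' : d ≠ q := fun h => hdvd (h ▸ hqm)
      exact ih (d+1) f m q (by omega) hm (by omega) hqq hqm (by omega)

-- non-prime inputs: the two factorizations coincide
lemma factorize_eq_factorator (n : Int) (h : ¬ (2 ≤ n ∧ NoSmall n n)) :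
    factorize n = factorator n := by
  by_cases hn : n ≤ 1
  · have hB : factorize n = PySem.Dict.empty := by
      unfold factorize
      have hstop : altOuter (2*n.toNat+1) 2 PySem.Dict.empty n = (PySem.Dict.empty, n) := by
        simp only [altOuter]
        rw [if_neg (show ¬ ((2:Int) * 2 ≤ n) by omega)]
      rw [hstop]
      simp only []
      rw [if_neg (by omega : ¬ (1:Int) < n)]
    have hA : factorator n = PySem.Dict.empty := by
      have hr : PySem.List.pyRange 2 n 1 = [] := PySem.List.pyRange_one_eq_nil (by omega)
      simp [factorator, primes, hr]
    rw [hA, hB]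
  · push_neg at hn
    have h2 : 2 ≤ n := by omega
    have hns : ¬ NoSmall n n := fun hns => h ⟨h2, hns⟩
    unfold NoSmall at hns
    push_neg at hns
    obtain ⟨q, hq2, hqn, hqd⟩ := hns
    -- extract a divisor q' with q' * q' ≤ n
    obtain ⟨c, hc⟩ := hqd
    have hcpos : 0 < c := by nlinarith
    have hc2 : 2 ≤ c := by nlinarith
    have hkey : ∃ q' : Int, 2 ≤ q' ∧ q' * q' ≤ n ∧ q' ∣ n := by
      by_cases hq : q * q ≤ n
      · exact ⟨q, hq2, hq, ⟨c, hc⟩⟩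
      · push_neg at hq
        have hcq : c < q := by nlinarith
        exact ⟨c, hc2, by nlinarith, ⟨q, by rw [hc]; ring⟩⟩
    obtain ⟨q', hq'2, hq'q, hq'd⟩ := hkey
    have hq'n : q' ≤ n := by nlinarith
    have hlt := altOuter_composite (2*n.toNat+1) 2 PySem.Dict.empty n q'
      (by omega) (by omega) hq'2 hq'q hq'd (by omega)
    have href := alt_eq_ref (2*n.toNat+1) 2 PySem.Dict.empty n n (by omega) (by omega) le_rfl
      (fun q hq1 hq2 _ => by omega) (by simp) (by omega)
    have hApre : factorator n = (refFold (PySem.List.pyRange 2 n 1) (PySem.Dict.empty, n)).1 := by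
      show (refFold ((PySem.List.pyRange 2 n 1).filter is_prime) (PySem.Dict.empty, n)).1 = _
      have key := filter_eq_full (n-2).toNat 2 PySem.Dict.empty n (by omega) (by omega)
        (fun q h1 h2 _ => by omega)
      rw [show (2:Int) + (((n-2).toNat : Nat) : Int) = n by omega] at key
      rw [key]
    rw [hApre, ← href]
    unfold factorize
    set st := altOuter (2*n.toNat+1) 2 PySem.Dict.empty n with hst
    have hne : st.2 ≠ n := by omega
    by_cases h1 : 1 < st.2
    · rw [if_pos h1, if_pos ⟨h1, hne⟩]
    · rw [if_neg h1, if_neg (fun h => h1 h.1)]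

-- every key of B's factorization divides n and forces 2 ≤ n
lemma factorize_keys_dvd (n : Int) : ∀ k ∈ (factorize n).keys, k ∣ n ∧ 2 ≤ n := by
  intro k hk
  by_cases hp : 2 ≤ n ∧ NoSmall n n
  · rw [factorize_prime n hp.1 hp.2] at hk
    rw [PySem.Dict.mem_keys_insert] at hk
    rcases hk with h | h
    · exact ⟨h ▸ dvd_refl n, hp.1⟩
    · simp at h
  · rw [factorize_eq_factorator n hp] at hk
    have hd := factorator_keys_dvd n k hk
    refine ⟨hd, ?_⟩
    by_contra hn
    push_neg at hn
    -- n ≤ 1: factorator n is empty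
    have hA : factorator n = PySem.Dict.empty := by
      have hr : PySem.List.pyRange 2 n 1 = [] := PySem.List.pyRange_one_eq_nil (by omega)
      simp [factorator, primes, hr]
    rw [hA] at hk
    simp at hk

-- the two product loops agree on any pair of dicts whose keys are duplicate-free
lemma prod_eq (F1 F2 : PySem.Dict Int Int) (h1 : F1.keys.Nodup) :
    (PySem.Set.inter (PySem.Set.ofList F1.keys) F2.keys).foldl
      (fun n_3 factor => n_3 * (factor * min (F1.getD factor 0) (F2.getD factor 0))) 1
    = F1.items.foldl
      (fun n_3 p => if F2.contains p.1 then n_3 * (p.1 * min p.2 (F2.getD p.1 0)) else n_3) 1 := by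
  symm
  rw [PySem.Dict.items_eq_map_keys F1 h1 0, List.foldl_map]
  simp only []
  rw [PySem.List.foldl_if_eq_foldl_filter (fun k => F2.contains k)
      (fun n_3 k => n_3 * (k * min (F1.getD k 0) (F2.getD k 0)))]
  rw [PySem.Set.inter, PySem.Set.ofList_eq_self_of_nodup _ h1]
  congr 1
  apply List.filter_congr
  intro k _
  rw [Bool.eq_iff_iff]
  simp [PySem.Dict.contains_iff_mem_keys, PySem.Set.contains]

-- B's product loop yields 1 when no key of F1 occurs in F2
lemma fold_items_nop (l : List (Int × Int)) (F2 : PySem.Dict Int Int)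
    (h : ∀ p ∈ l, F2.contains p.1 = false) :
    l.foldl (fun n_3 p =>
      if F2.contains p.1 then n_3 * (p.1 * min p.2 (F2.getD p.1 0)) else n_3) 1 = 1 := by
  induction l with
  | nil => rfl
  | cons p rest ih =>
    simp only [List.foldl_cons, h p (by simp), Bool.false_eq_true, if_false]
    exact ih fun p' hp' => h p' (by simp [hp'])

-- A's product loop yields 1 when one key list is empty
lemma a_prod_left_empty (F2 : PySem.Dict Int Int) :
    (PySem.Set.inter (PySem.Set.ofList (PySem.Dict.keys (PySem.Dict.empty : PySem.Dict Int Int)))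
      F2.keys).foldl
      (fun n_3 factor => n_3 * (factor *
        min ((PySem.Dict.empty : PySem.Dict Int Int).getD factor 0) (F2.getD factor 0))) 1 = 1 := by
  rfl

lemma a_prod_right_empty (F1 : PySem.Dict Int Int) :
    (PySem.Set.inter (PySem.Set.ofList F1.keys)
      (PySem.Dict.keys (PySem.Dict.empty : PySem.Dict Int Int))).foldl
      (fun n_3 factor => n_3 * (factor * min (F1.getD factor 0)
        ((PySem.Dict.empty : PySem.Dict Int Int).getD factor 0))) 1 = 1 := by
  have : PySem.Set.inter (PySem.Set.ofList F1.keys)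
      (PySem.Dict.keys (PySem.Dict.empty : PySem.Dict Int Int)) = [] := by
    simp [PySem.Set.inter, PySem.Dict.keys_empty]
  rw [this]
  rfl

-- ===== VERDICT (by name: the statement is the Claim_ definition above) =====
theorem similar_factors_spec : Claim_unchanged_similar_factors := by
  intro n_1 n_2 _ hD
  show similar_factors n_1 n_2 = similar_factors_alt n_1 n_2
  unfold D_similar_factors at hD
  push_neg at hD
  simp only [similar_factors, similar_factors_alt]
  by_cases h1 : 2 ≤ n_1 ∧ NoSmall n_1 n_1
  · -- n_1 prime: A's first map is empty, B's is {n_1: 1} with n_1 absent from B's second map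
    have hp1 : Nat.Prime n_1.toNat := (prime_bridge n_1).mp h1
    rw [factorator_prime n_1 h1.1 h1.2, factorize_prime n_1 h1.1 h1.2]
    rw [a_prod_left_empty]
    rw [show (PySem.Dict.empty.insert n_1 (1:Int)).items = [(n_1, 1)] from rfl]
    rw [fold_items_nop _ _ (fun p hp => by
      simp only [List.mem_singleton] at hp
      subst hp
      by_contra hc
      simp only [Bool.not_eq_false] at hc
      have hk := (PySem.Dict.contains_iff_mem_keys _ _).mp hc
      obtain ⟨hdvd, hge⟩ := factorize_keys_dvd n_2 n_1 hk
      have := hD.1 hp1 hdvd; omega)]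
  · by_cases h2 : 2 ≤ n_2 ∧ NoSmall n_2 n_2
    · -- n_2 prime (n_1 not): A's second map is empty, B's is {n_2: 1}
      have hp2 : Nat.Prime n_2.toNat := (prime_bridge n_2).mp h2
      rw [factorator_prime n_2 h2.1 h2.2, factorize_prime n_2 h2.1 h2.2,
          factorize_eq_factorator n_1 h1]
      rw [a_prod_right_empty]
      rw [fold_items_nop _ _ (fun p hp => by
        have hkey : p.1 ∈ (factorator n_1).keys := PySem.Dict.mem_keys_of_mem_items _ hp
        by_contra hc
        simp only [Bool.not_eq_false] at hc
        rw [show (PySem.Dict.empty.insert n_2 (1:Int)).contains p.1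
              = (p.1 == n_2 || (PySem.Dict.empty : PySem.Dict Int Int).contains p.1) from
            PySem.Dict.contains_insert _ _ _ _] at hc
        simp only [PySem.Dict.contains_empty, Bool.or_false, beq_iff_eq] at hc
        subst hc
        have hdvd := factorator_keys_dvd n_1 p.1 hkey
        have hn1 : 2 ≤ n_1 := by
          by_contra hn
          push_neg at hn
          have hA : factorator n_1 = PySem.Dict.empty := by
            have hr : PySem.List.pyRange 2 n_1 1 = [] :=
              PySem.List.pyRange_one_eq_nil (by omega)
            simp [factorator, primes, hr]
          rw [hA] at hkey
          simp at hkey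
        have := hD.2 hp2 hdvd; omega)]
    · -- neither prime: the factorizations coincide, products agree
      rw [factorize_eq_factorator n_1 h1, factorize_eq_factorator n_2 h2]
      exact prod_eq _ _ (factorator_keys_nodup n_1)

theorem similar_factors_changed : Claim_changed_similar_factors := by
  unfold Claim_changed_similar_factors; decide
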